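-- pv_equiv track=rewrite | github.com/jobe3774/mbpv | SMA_Inverters.py | shiftValue
-- ===== SOURCE A (Python) =====
-- class SunnyBoyConstants():
--     NAN_VALUE = 0x80000000
--     # SMA Modbus registers are 16 bits wide.
--     MBREG_BITWIDTH = 16
--     STATE_OK = 307
--     STATE_OFF = 303
--     STATE_WARNING = 455
--     STATE_ERROR = 35
--     STATE_UNKNOWN = 0
--     STATE_AS_STRING = { STATE_UNKNOWN: "unknown",
--                         STATE_OK: "ok",
--                         STATE_OFF: "off",
--                         STATE_WARNING: "warning",
--                         STATE_ERROR: "error" }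
--
-- def shiftValue(regVal, sequenceSize):
--     if regVal is None:
--         return 0
--     if len(regVal) != sequenceSize:
--         return 0
--
--     val = 0
--     for i in range(0, sequenceSize, 1):
--         val |= regVal[i]
--         if i < sequenceSize-1:
--             val <<= SunnyBoyConstants.MBREG_BITWIDTH
--
--     if val == SunnyBoyConstants.NAN_VALUE:
--         val = 0
--     return val
-- ===== SOURCE B (Python) =====
-- NAN_VALUE = 0x80000000
-- MBREG_BITWIDTH = 16
--
--
-- def _pack(regs):
--     # Divide and conquer: pack each half, then OR the left half shifted past the right half.
--     n = len(regs)
--     if n == 0: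
--         return 0
--     if n == 1:
--         return regs[0]
--     mid = n // 2
--     return (_pack(regs[:mid]) << (MBREG_BITWIDTH * (n - mid))) | _pack(regs[mid:])
--
--
-- def shiftValue(regVal, sequenceSize):
--     if regVal is None:
--         return 0
--     if len(regVal) != sequenceSize:
--         return 0
--     val = _pack(regVal)
--     if val == NAN_VALUE:
--         val = 0
--     return val
-- ===== Notes on version B (the rewrite author's own statement) =====
-- stated objective: alternative
-- what changed: A packs the registers with one left-to-right OR-then-shift accumulator loop; B packs them by divide and conquer, recursively packing each half of the list and ORing the left half shifted left by 16 bits per right-half register.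
import Mathlib
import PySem

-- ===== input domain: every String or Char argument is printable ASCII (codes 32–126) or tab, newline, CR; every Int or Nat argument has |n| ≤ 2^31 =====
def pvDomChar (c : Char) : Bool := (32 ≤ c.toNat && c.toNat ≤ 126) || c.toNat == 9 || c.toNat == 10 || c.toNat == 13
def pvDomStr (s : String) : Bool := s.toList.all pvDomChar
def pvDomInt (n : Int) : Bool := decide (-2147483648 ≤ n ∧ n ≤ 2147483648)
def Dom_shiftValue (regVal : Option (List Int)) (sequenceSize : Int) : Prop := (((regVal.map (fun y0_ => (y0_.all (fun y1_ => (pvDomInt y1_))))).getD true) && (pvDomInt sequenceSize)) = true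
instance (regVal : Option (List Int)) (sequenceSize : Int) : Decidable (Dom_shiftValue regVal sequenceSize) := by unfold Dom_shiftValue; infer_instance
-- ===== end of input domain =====

-- B replaces A's linear OR-then-conditionally-shift accumulator loop by a divide-and-conquer
-- packer (recursively pack each half, OR the left half shifted by 16 bits per right-half slot):
-- an alternative decomposition of the same cost.


-- ===== PORT A =====
-- Python `val | x` is `Int.lor` (ℤ has no `|||` instance here); `val << 16` is `<<< (16 : Nat)`,
-- exact for every Int (Int.shiftLeft_eq). `regVal[i]` is pyGetD: the guard makes len(regVal) =
-- sequenceSize, so every index of range(0, sequenceSize, 1) is in range and no IndexError occurs.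
def shiftValue (regVal : Option (List Int)) (sequenceSize : Int) : Int :=
  match regVal with
  | none => 0
  | some regs =>
    if PySem.List.len regs ≠ sequenceSize then 0
    else
      let val := (PySem.List.pyRange 0 sequenceSize 1).foldl
        (fun val i =>
          let v := Int.lor val (PySem.List.pyGetD regs i 0)
          if i < sequenceSize - 1 then v <<< (16 : Nat) else v) 0
      if val = 2147483648 then 0 else val

-- ===== PORT B =====
-- Source B's _pack: the slices regs[:mid] / regs[mid:] with 0 ≤ mid ≤ len(regs) are exactly
-- List.take / List.drop; `regs[0]` on the singleton branch is pyGetD (in range, so exact);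
-- `n // 2` on the nonnegative length is Nat division; the shift count 16*(n-mid) is a Nat.
def packDC (xs : List Int) : Int :=
  if xs.length = 0 then 0
  else if xs.length = 1 then PySem.List.pyGetD xs 0 0
  else
    Int.lor ((packDC (xs.take (xs.length / 2))) <<< (16 * (xs.length - xs.length / 2)))
            (packDC (xs.drop (xs.length / 2)))
termination_by xs.length
decreasing_by
  · simp only [List.length_take]; omega
  · simp only [List.length_drop]; omega

def shiftValue_alt (regVal : Option (List Int)) (sequenceSize : Int) : Int :=
  match regVal with
  | none => 0
  | some regs =>
    if PySem.List.len regs ≠ sequenceSize then 0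
    else
      let val := packDC regs
      if val = 2147483648 then 0 else val

-- ===== PRECONDITION & SPEC =====
def Spec_shiftValue (regVal : Option (List Int)) (sequenceSize : Int) (out : Int) : Prop := out = shiftValue_alt regVal sequenceSize
instance (regVal : Option (List Int)) (sequenceSize : Int) (out : Int) : Decidable (Spec_shiftValue regVal sequenceSize out) := by unfold Spec_shiftValue; infer_instance

-- ===== CLAIM (what is proved, stated in full; the proofs are below) =====
def Claim_equal_shiftValue : Prop := ∀ (regVal : Option (List Int)) (sequenceSize : Int), Dom_shiftValue regVal sequenceSize → Spec_shiftValue regVal sequenceSize (shiftValue regVal sequenceSize)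

-- ===== LEMMAS AND PROOFS =====

-- ---- bit-level toolkit for Int.lor and `<<<` ----

theorem natTestBit_shiftLeft_sub_one (m s k : Nat) :
    (((m + 1) <<< s) - 1).testBit k = (decide (k < s) || m.testBit (k - s)) := by
  induction s generalizing k with
  | zero => simp
  | succ s ih =>
    have hpos : 0 < (m + 1) <<< s := by
      rw [Nat.shiftLeft_eq]; positivity
    have hbit : ((m + 1) <<< (s + 1)) - 1 = Nat.bit true (((m + 1) <<< s) - 1) := by
      rw [Nat.shiftLeft_succ, Nat.bit]
      simp only [cond_true]
      omega
    rw [hbit]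
    cases k with
    | zero => simp
    | succ k =>
      rw [Nat.testBit_bit_succ, ih]
      have hsub : k + 1 - (s + 1) = k - s := by omega
      rw [hsub]
      simp

theorem intTestBit_shiftLeft (x : Int) (s k : Nat) :
    (x <<< s).testBit k = (decide (s ≤ k) && x.testBit (k - s)) := by
  cases x with
  | ofNat m =>
    show (Int.ofNat (m <<< s)).testBit k = _
    simp only [Int.testBit, Nat.testBit_shiftLeft]
  | negSucc m =>
    show (Int.negSucc (((m + 1) <<< s) - 1)).testBit k = _
    simp only [Int.testBit, natTestBit_shiftLeft_sub_one, Bool.not_or]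
    by_cases h : s ≤ k
    · have h2 : ¬ k < s := by omega
      simp [h, h2]
    · have h2 : k < s := by omega
      simp [h, h2]

theorem intTestBit_ext {x y : Int} (h : ∀ k, x.testBit k = y.testBit k) : x = y := by
  have big : ∀ m n : Nat, m.testBit (m + n) = false := fun m n =>
    Nat.testBit_lt_two_pow (Nat.lt_of_lt_of_le Nat.lt_two_pow_self
      (Nat.pow_le_pow_right (by norm_num) (Nat.le_add_right m n)))
  cases x with
  | ofNat m =>
    cases y with
    | ofNat n =>
      exact congrArg Int.ofNat (Nat.eq_of_testBit_eq fun k => h k)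
    | negSucc n =>
      exfalso
      have := h (m + n)
      simp only [Int.testBit] at this
      rw [big m n, Nat.add_comm m n, big n m] at this
      simp at this
  | negSucc m =>
    cases y with
    | ofNat n =>
      exfalso
      have := h (n + m)
      simp only [Int.testBit] at this
      rw [big n m, Nat.add_comm n m, big m n] at this
      simp at this
    | negSucc n =>
      refine congrArg Int.negSucc (Nat.eq_of_testBit_eq fun k => ?_)
      have := h k
      simp only [Int.testBit, Bool.not_inj_iff] at this
      exact this

theorem intTestBit_zero (k : Nat) : Int.testBit 0 k = false := by
  have : (0 : Int) = Int.ofNat 0 := rfl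
  rw [this]
  simp [Int.testBit]

theorem intLor_zero (x : Int) : Int.lor x 0 = x := by
  refine intTestBit_ext fun k => ?_
  rw [Int.testBit_lor, intTestBit_zero, Bool.or_false]

theorem intZero_lor (x : Int) : Int.lor 0 x = x := by
  refine intTestBit_ext fun k => ?_
  rw [Int.testBit_lor, intTestBit_zero, Bool.false_or]

theorem intLor_assoc (x y z : Int) : Int.lor (Int.lor x y) z = Int.lor x (Int.lor y z) := by
  refine intTestBit_ext fun k => ?_
  simp only [Int.testBit_lor, Bool.or_assoc]

theorem intShiftLeft_lor (x y : Int) (s : Nat) :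
    (Int.lor x y) <<< s = Int.lor (x <<< s) (y <<< s) := by
  refine intTestBit_ext fun k => ?_
  simp only [intTestBit_shiftLeft, Int.testBit_lor, Bool.and_or_distrib_left]

-- ---- the common packed value: A's combine as a left fold ----

/-- The packed value both versions compute: fold `a ↦ (a <<< 16) | x` over the registers. -/
def packFold (xs : List Int) : Int :=
  xs.foldl (fun a x => Int.lor (a <<< (16 : Nat)) x) 0

theorem packFold_append_singleton (xs : List Int) (y : Int) :
    packFold (xs ++ [y]) = Int.lor ((packFold xs) <<< (16 : Nat)) y := by
  unfold packFold
  rw [List.foldl_append]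
  rfl

/-- packFold splits across an append: the prefix is shifted past the whole suffix. -/
theorem packFold_append (xs ys : List Int) :
    packFold (xs ++ ys) = Int.lor ((packFold xs) <<< (16 * ys.length)) (packFold ys) := by
  induction ys using List.reverseRecOn with
  | nil => simp [packFold, intLor_zero]
  | append_singleton t y ih =>
    rw [← List.append_assoc, packFold_append_singleton, ih, intShiftLeft_lor,
      ← Int.shiftLeft_add, packFold_append_singleton, intLor_assoc]
    have : 16 * t.length + 16 = 16 * (t ++ [y]).length := by
      simp [List.length_append]; ring
    rw [this]

-- ---- B's divide-and-conquer computes packFold ----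

theorem packDC_eq (xs : List Int) : packDC xs = packFold xs := by
  induction hn : xs.length using Nat.strong_induction_on generalizing xs with
  | _ n ih =>
    subst hn
    rw [packDC]
    split_ifs with h0 h1
    · rw [List.length_eq_zero_iff.mp h0]; simp [packFold]
    · obtain ⟨x, hx⟩ := List.length_eq_one_iff.mp h1
      subst hx
      simp [PySem.List.pyGetD, packFold, Int.zero_shiftLeft, intZero_lor]
    · have h2 : 2 ≤ xs.length := by omega
      rw [ih _ (by simp only [List.length_take]; omega) _ rfl,
          ih _ (by simp only [List.length_drop]; omega) _ rfl]
      have hsplit := packFold_append (xs.take (xs.length / 2)) (xs.drop (xs.length / 2))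
      rw [List.take_append_drop] at hsplit
      rw [hsplit, List.length_drop]

-- ---- A's loop computes packFold ----

/-- A's always-shifting prefix combine. -/
def hFold (ys : List Int) : Int :=
  ys.foldl (fun a x => (Int.lor a x) <<< (16 : Nat)) 0

theorem hFold_append_singleton (ys : List Int) (y : Int) :
    hFold (ys ++ [y]) = (Int.lor (hFold ys) y) <<< (16 : Nat) := by
  unfold hFold
  rw [List.foldl_append]
  rfl

theorem hFold_eq (ys : List Int) : hFold ys = (packFold ys) <<< (16 : Nat) := by
  induction ys using List.reverseRecOn with
  | nil => simp [hFold, packFold, Int.zero_shiftLeft]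
  | append_singleton t y ih =>
    rw [hFold_append_singleton, ih, packFold_append_singleton]

theorem aLoop_prefix (xs : List Int) (m : Nat) (hm : (m : Int) ≤ (xs.length : Int) - 1) :
    (PySem.List.pyRange 0 (m : Int) 1).foldl
      (fun val i =>
        let v := Int.lor val (PySem.List.pyGetD xs i 0)
        if i < (xs.length : Int) - 1 then v <<< (16 : Nat) else v) 0
      = hFold (xs.take m) := by
  induction m with
  | zero => simp [PySem.List.pyRange_one_eq_nil, hFold]
  | succ m ih =>
    have h0 : (0 : Int) ≤ (m : Int) := by positivity
    have hrange : PySem.List.pyRange 0 ((m : Int) + 1) 1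
        = PySem.List.pyRange 0 (m : Int) 1 ++ [(m : Int)] :=
      PySem.List.pyRange_one_succ_right h0
    have hcast : ((m + 1 : Nat) : Int) = (m : Int) + 1 := by push_cast; ring
    rw [hcast, hrange, List.foldl_append, ih (by omega)]
    have hmlt : m < xs.length := by omega
    have hcond : (m : Int) < (xs.length : Int) - 1 := by omega
    have hget : PySem.List.pyGetD xs (m : Int) 0 = xs[m] := by
      rw [PySem.List.pyGetD_natCast, List.getD_eq_getElem xs 0 hmlt]
    have htake : xs.take (m + 1) = xs.take m ++ [xs[m]] := by
      rw [List.take_add_one, List.getElem?_eq_getElem hmlt]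
      rfl
    simp only [List.foldl_cons, List.foldl_nil, hget, if_pos hcond, htake,
      hFold_append_singleton]

theorem aLoop_value (xs : List Int) :
    (PySem.List.pyRange 0 (xs.length : Int) 1).foldl
      (fun val i =>
        let v := Int.lor val (PySem.List.pyGetD xs i 0)
        if i < (xs.length : Int) - 1 then v <<< (16 : Nat) else v) 0
      = packFold xs := by
  cases hx : xs with
  | nil => simp [PySem.List.pyRange_one_eq_nil, packFold]
  | cons z zs =>
    rw [← hx]
    have hne : xs ≠ [] := by rw [hx]; exact List.cons_ne_nil z zs
    have hlen : 1 ≤ xs.length := by rw [hx]; exact Nat.succ_le_succ (Nat.zero_le _)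
    set n := xs.length with hn
    have hcast : ((n : Nat) : Int) = ((n - 1 : Nat) : Int) + 1 := by omega
    have hrange : PySem.List.pyRange 0 (n : Int) 1
        = PySem.List.pyRange 0 ((n - 1 : Nat) : Int) 1 ++ [((n - 1 : Nat) : Int)] := by
      rw [hcast]; exact PySem.List.pyRange_one_succ_right (by positivity)
    have hmlt : n - 1 < xs.length := by omega
    have hget : PySem.List.pyGetD xs ((n - 1 : Nat) : Int) 0 = xs[n - 1] := by
      rw [PySem.List.pyGetD_natCast, List.getD_eq_getElem xs 0 hmlt]
    have hcond : ¬ (((n - 1 : Nat) : Int) < (n : Int) - 1) := by omega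
    rw [hrange, List.foldl_append, aLoop_prefix xs (n - 1) (by omega)]
    simp only [List.foldl_cons, List.foldl_nil, hget, if_neg hcond]
    rw [hFold_eq]
    have hlast : xs.take (n - 1) ++ [xs[n - 1]] = xs := by
      have h1 : xs.take (n - 1 + 1) = xs.take (n - 1) ++ [xs[n - 1]] := by
        rw [List.take_add_one, List.getElem?_eq_getElem hmlt]
        rfl
      have h2 : n - 1 + 1 = n := by omega
      rw [← h1, h2, hn, List.take_length]
    calc Int.lor ((packFold (xs.take (n - 1))) <<< (16 : Nat)) xs[n - 1]
        = packFold (xs.take (n - 1) ++ [xs[n - 1]]) := (packFold_append_singleton _ _).symm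
      _ = packFold xs := by rw [hlast]

-- ===== VERDICT (by name: the statement is the Claim_ definition above) =====
theorem shiftValue_spec : Claim_equal_shiftValue := by
  intro regVal sequenceSize _
  unfold Spec_shiftValue shiftValue shiftValue_alt
  cases regVal with
  | none => rfl
  | some regs =>
    simp only
    by_cases hlen : PySem.List.len regs ≠ sequenceSize
    · rw [if_pos hlen, if_pos hlen]
    · rw [if_neg hlen, if_neg hlen]
      have hseq : sequenceSize = (regs.length : Int) := by
        have := not_not.mp hlen
        simpa [PySem.List.len_eq] using this.symm
      subst hseq
      rw [aLoop_value, packDC_eq]
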